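-- pv_equiv track=rewrite | github.com/LFBossa/planilha2latex.py | ferramentas/filtros.py | tags_unicas
-- ===== SOURCE A (Python) =====
-- def tags_unicas(lista):
--     """Retorna um dicionário no formato {n: string} com as ocorrências únicas
--     das strings na lista. """
--     i = 1
--     dicio = dict()
--     for val in lista:
--         if val not in dicio:
--             dicio[val] = i
--             i = i + 1
--     return dicio
-- ===== SOURCE B (Python) =====
-- def tags_unicas(lista):
--     """Retorna um dicionário no formato {n: string} com as ocorrências únicas
--     das strings na lista. """
--     # rank of a value = number of distinct values strictly before its first
--     # occurrence, plus one; computed independently for each element, no counter.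
--     return {v: len(set(lista[:lista.index(v)])) + 1 for v in lista}
-- ===== Notes on version B (the rewrite author's own statement) =====
-- stated objective: alternative
-- what changed: Replaces A's single stateful pass (membership guard plus a manually threaded counter) by a stateless dict comprehension that computes each value's rank independently as the closed form len(set(lista[:lista.index(v)])) + 1, i.e. the number of distinct values before its first occurrence.
import Mathlib
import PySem

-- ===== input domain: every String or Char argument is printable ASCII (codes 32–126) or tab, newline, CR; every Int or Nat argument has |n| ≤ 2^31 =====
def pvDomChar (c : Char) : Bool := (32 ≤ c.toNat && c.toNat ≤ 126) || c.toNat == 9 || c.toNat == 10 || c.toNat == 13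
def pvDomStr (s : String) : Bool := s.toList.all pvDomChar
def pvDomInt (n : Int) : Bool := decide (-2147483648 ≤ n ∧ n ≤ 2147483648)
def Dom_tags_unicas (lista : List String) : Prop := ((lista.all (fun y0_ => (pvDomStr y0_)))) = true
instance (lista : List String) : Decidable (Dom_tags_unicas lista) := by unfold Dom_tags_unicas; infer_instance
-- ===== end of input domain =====

-- B replaces A's stateful counter pass by a stateless dict comprehension that
-- computes each value's rank independently as len(set(lista[:lista.index(v)])) + 1 (alternative).


-- ===== PORT A =====
-- loop over lista with state (i, dicio); 'val not in dicio' → contains = false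
def tags_unicas (lista : List String) : List (String × Int) :=
  (lista.foldl
    (fun (st : Int × PySem.Dict String Int) val =>
      if st.2.contains val = false then (st.1 + 1, st.2.insert val st.1) else st)
    (1, PySem.Dict.empty)).2.items

-- ===== PORT B =====
-- dict comprehension {v: len(set(lista[:lista.index(v)])) + 1 for v in lista}:
-- a fold of overwriting inserts; lista.index(v) is PySem.List.index? (the
-- ValueError branch is unreachable since v ∈ lista, so .getD 0 is never used).
def tags_unicas_alt (lista : List String) : List (String × Int) :=
  (lista.foldl
    (fun (d : PySem.Dict String Int) v =>
      d.insert v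
        (((PySem.Set.ofList (PySem.List.slice lista none
            (some (((PySem.List.index? lista v).getD 0 : Nat) : Int)))).length : Int) + 1))
    PySem.Dict.empty).items

-- ===== PRECONDITION & SPEC =====
def Spec_tags_unicas (lista : List String) (out : List (String × Int)) : Prop := out = tags_unicas_alt lista
instance (lista : List String) (out : List (String × Int)) : Decidable (Spec_tags_unicas lista out) := by unfold Spec_tags_unicas; infer_instance

-- ===== CLAIM (what is proved, stated in full; the proofs are below) =====
def Claim_equal_tags_unicas : Prop := ∀ (lista : List String), Dom_tags_unicas lista → Spec_tags_unicas lista (tags_unicas lista)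

-- ===== LEMMAS AND PROOFS =====

-- numbering of a list from n: the items A's loop appends for a run of fresh keys
def pvNumFrom : List String → Int → List (String × Int)
  | [], _ => []
  | v :: t, n => (v, n) :: pvNumFrom t (n + 1)

theorem pv_filter_discard (s : List String) (v : String) (p : String → Bool) :
    (PySem.Set.discard s v).filter p = s.filter (fun y => p y && !(y == v)) := by
  show (s.filter (fun y => !(y == v))).filter p = _
  rw [List.filter_filter]

-- invariant of A's loop: starting from counter n and dict d, the final items are
-- d.items followed by the numbering (from n) of the not-yet-seen distinct values
theorem pv_loopA (l : List String) : ∀ (n : Int) (d : PySem.Dict String Int),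
    ((l.foldl
      (fun (st : Int × PySem.Dict String Int) val =>
        if st.2.contains val = false then (st.1 + 1, st.2.insert val st.1) else st)
      (n, d)).2).items
    = d.items ++ pvNumFrom ((PySem.Set.ofList l).filter (fun y => !(d.keys.contains y))) n := by
  induction l with
  | nil => intro n d; simp [PySem.Set.ofList, pvNumFrom]
  | cons v t ih =>
    intro n d
    by_cases h : d.contains v = false
    · -- fresh key: inserted with value n, counter becomes n + 1
      have hkeys := PySem.Dict.keys_insert_of_not_contains d (κ := String) (ν := Int) n h
      have hmem : d.keys.contains v = false := by
        by_contra hc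
        simp only [Bool.not_eq_false, List.contains_eq_mem, decide_eq_true_eq] at hc
        exact absurd ((PySem.Dict.contains_iff_mem_keys d v).mpr hc) (by simp [h])
      simp only [List.foldl_cons, h, if_true, ih (n + 1) (d.insert v n),
        PySem.Dict.items_insert_of_not_contains d n h, hkeys,
        PySem.Set.ofList_cons, List.filter_cons, pv_filter_discard]
      have hpred : ∀ y : String,
          (!(d.keys ++ [v]).contains y) = ((!(d.keys.contains y)) && !(y == v)) := by
        intro y
        simp only [List.contains_eq_mem, List.mem_append, List.mem_singleton]
        by_cases hy : y = v <;> by_cases hk : y ∈ d.keys <;> simp [hy, hk]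
      simp only [hmem, Bool.not_false, if_true, pvNumFrom, List.append_assoc,
        List.cons_append, List.nil_append]
      exact congrArg (fun u => d.items ++ (v, n) :: pvNumFrom u (n + 1)) (List.filter_congr (fun y _ => hpred y))
    · -- already present: state unchanged, v is dropped from the fresh values
      have h' : d.contains v = true := by revert h; cases d.contains v <;> simp
      have hmem : d.keys.contains v = true := by
        simp only [List.contains_eq_mem, decide_eq_true_eq]
        exact (PySem.Dict.contains_iff_mem_keys d v).mp h'
      simp only [List.foldl_cons, h', Bool.true_eq_false, if_false, ih n d,
        PySem.Set.ofList_cons, List.filter_cons, hmem, Bool.not_true, if_false,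
        pv_filter_discard]
      congr 2
      refine List.filter_congr ?_
      intro y _
      by_cases hy : y = v
      · subst hy; simpa using hmem
      · simp [hy]

-- invariant of B's loop: inserting v ↦ f v for every v of l (overwrites carry the
-- same value, so they leave the items unchanged) appends the fresh distinct values
theorem pv_loopB (f : String → Int) (l : List String) : ∀ (d : PySem.Dict String Int),
    (∀ p ∈ d.items, p.2 = f p.1) →
    (l.foldl (fun d v => d.insert v (f v)) d).items
    = d.items ++ ((PySem.Set.ofList l).filter (fun y => !(d.keys.contains y))).map (fun v => (v, f v)) := by
  induction l with
  | nil => intro d _; simp [PySem.Set.ofList]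
  | cons v t ih =>
    intro d hd
    by_cases h : d.contains v = false
    · -- fresh key: appended
      have hkeys := PySem.Dict.keys_insert_of_not_contains d (κ := String) (ν := Int) (f v) h
      have hitems := PySem.Dict.items_insert_of_not_contains d (f v) h
      have hmem : d.keys.contains v = false := by
        by_contra hc
        simp only [Bool.not_eq_false, List.contains_eq_mem, decide_eq_true_eq] at hc
        exact absurd ((PySem.Dict.contains_iff_mem_keys d v).mpr hc) (by simp [h])
      have hd' : ∀ p ∈ (d.insert v (f v)).items, p.2 = f p.1 := by
        intro p hp
        rw [hitems] at hp
        rcases List.mem_append.mp hp with hp | hp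
        · exact hd p hp
        · simp only [List.mem_singleton] at hp; subst hp; rfl
      simp only [List.foldl_cons, ih (d.insert v (f v)) hd', hitems, hkeys,
        PySem.Set.ofList_cons, List.filter_cons, pv_filter_discard]
      have hpred : ∀ y : String,
          (!(d.keys ++ [v]).contains y) = ((!(d.keys.contains y)) && !(y == v)) := by
        intro y
        simp only [List.contains_eq_mem, List.mem_append, List.mem_singleton]
        by_cases hy : y = v <;> by_cases hk : y ∈ d.keys <;> simp [hy, hk]
      simp only [hmem, Bool.not_false, if_true, List.map_cons, List.append_assoc,
        List.cons_append, List.nil_append]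
      exact congrArg (fun u => d.items ++ (v, f v) :: u.map (fun w => (w, f w)))
        (List.filter_congr (fun y _ => hpred y))
    · -- key already present: the overwrite rewrites (v, f v) over itself
      have h' : d.contains v = true := by revert h; cases d.contains v <;> simp
      have hmem : d.keys.contains v = true := by
        simp only [List.contains_eq_mem, decide_eq_true_eq]
        exact (PySem.Dict.contains_iff_mem_keys d v).mp h'
      have hitems : (d.insert v (f v)).items = d.items := by
        rw [PySem.Dict.items_insert_of_contains d (f v) h']
        have : ∀ p ∈ d.items, (if p.1 == v then (v, f v) else p) = p := by
          intro p hp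
          by_cases hpv : p.1 == v
          · have h1 : p.1 = v := by simpa using hpv
            have h2 : p.2 = f p.1 := hd p hp
            simp only [hpv, if_true]
            rw [← h1, ← h2]
          · simp [hpv]
        calc d.items.map (fun p => if p.1 == v then (v, f v) else p)
            = d.items.map id := List.map_congr_left this
          _ = d.items := List.map_id _
      have hkeys : (d.insert v (f v)).keys = d.keys := by
        simp only [PySem.Dict.keys, hitems]
      have hd' : ∀ p ∈ (d.insert v (f v)).items, p.2 = f p.1 := by
        rw [hitems]; exact hd
      simp only [List.foldl_cons, ih (d.insert v (f v)) hd', hitems, hkeys,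
        PySem.Set.ofList_cons, List.filter_cons, hmem, Bool.not_true,
        pv_filter_discard]
      congr 2
      refine List.filter_congr ?_
      intro y _
      by_cases hy : y = v
      · subst hy; simpa using hmem
      · simp [hy]

-- filter (≠ w) and takeWhile (≠ v) commute when w ≠ v
theorem pv_comm (w v : String) (hwv : w ≠ v) : ∀ s : List String,
    (s.takeWhile (fun y => !(y == v))).filter (fun y => !(y == w))
    = (s.filter (fun y => !(y == w))).takeWhile (fun y => !(y == v)) := by
  intro s
  induction s with
  | nil => rfl
  | cons x t ih =>
    by_cases hxv : x = v
    · have hbv : (x == v) = true := by simp [hxv]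
      have hbw : (x == w) = false := by
        simp only [beq_eq_false_iff_ne, ne_eq]
        intro h
        exact hwv (h.symm.trans hxv)
      simp [hbv, hbw]
    · have hbv : (x == v) = false := by simp [hxv]
      by_cases hxw : x = w
      · have hbw : (x == w) = true := by simp [hxw]
        simp [hbv, hbw, ih]
      · have hbw : (x == w) = false := by simp [hxw]
        simp [hbv, hbw, ih]

-- the distinct values before the first occurrence of v are exactly the distinct
-- values of the whole list up to (and excluding) v
theorem pv_prefix : ∀ (l : List String) (v : String), v ∈ l →
    PySem.Set.ofList (l.take ((PySem.List.index? l v).getD 0))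
    = (PySem.Set.ofList l).takeWhile (fun y => !(y == v)) := by
  intro l
  induction l with
  | nil => intro v hv; cases hv
  | cons w t ih =>
    intro v hv
    by_cases hwv : w = v
    · subst hwv
      rw [PySem.List.index?_cons_self]
      simp [PySem.Set.ofList_cons]
    · have hvt : v ∈ t := by rcases List.mem_cons.mp hv with h | h; exact absurd h.symm hwv; exact h
      obtain ⟨i, hi⟩ := Option.isSome_iff_exists.mp ((PySem.List.index?_isSome_iff t v).mpr hvt)
      rw [PySem.List.index?_cons_of_ne t hwv, hi]
      have hgd : ((some i).map (· + 1)).getD 0 = i + 1 := rfl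
      rw [hgd]
      have ihv := ih v hvt
      rw [hi] at ihv
      simp only [Option.getD_some] at ihv
      have hq : (w == v) = false := by simp [hwv]
      calc PySem.Set.ofList ((w :: t).take (i + 1))
          = PySem.Set.ofList (w :: t.take i) := by rw [List.take_succ_cons]
        _ = w :: PySem.Set.discard (PySem.Set.ofList (t.take i)) w := PySem.Set.ofList_cons _ _
        _ = w :: ((PySem.Set.ofList t).takeWhile (fun y => !(y == v))).filter (fun y => !(y == w)) := by
              rw [ihv]; rfl
        _ = w :: ((PySem.Set.ofList t).filter (fun y => !(y == w))).takeWhile (fun y => !(y == v)) := by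
              rw [pv_comm w v hwv]
        _ = (PySem.Set.ofList (w :: t)).takeWhile (fun y => !(y == v)) := by
              rw [PySem.Set.ofList_cons, List.takeWhile_cons]
              simp only [hq, Bool.not_false, if_true]
              rfl

-- on a duplicate-free list, numbering each element by its takeWhile-prefix length
-- is exactly the sequential numbering
theorem pv_numbering : ∀ (u : List String), u.Nodup → ∀ n : Int,
    u.map (fun v => (v, ((u.takeWhile (fun y => !(y == v))).length : Int) + n)) = pvNumFrom u n := by
  intro u
  induction u with
  | nil => intro _ n; rfl
  | cons w t ih =>
    intro hnd n
    obtain ⟨hwt, hndt⟩ := List.nodup_cons.mp hnd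
    simp only [List.map_cons, pvNumFrom]
    have hhead : (w :: t).takeWhile (fun y => !(y == w)) = [] := by
      simp
    rw [hhead]
    congr 1
    · simp
    · rw [← ih hndt (n + 1)]
      refine List.map_congr_left ?_
      intro x hx
      have hwx : (w == x) = false := by
        simp only [beq_eq_false_iff_ne, ne_eq]
        intro h; exact hwt (by rwa [← h] at hx)
      simp only [List.takeWhile_cons, hwx, Bool.not_false, if_true, List.length_cons,
        Prod.mk.injEq, true_and]
      push_cast
      ring

-- ===== VERDICT (by name: the statement is the Claim_ definition above) =====
theorem tags_unicas_spec : Claim_equal_tags_unicas := by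
  intro lista _
  show tags_unicas lista = tags_unicas_alt lista
  rw [tags_unicas, tags_unicas_alt,
    pv_loopA lista 1 PySem.Dict.empty,
    pv_loopB _ lista PySem.Dict.empty (by intro p hp; cases hp)]
  have hfil : ∀ (u : List String),
      u.filter (fun y => !((PySem.Dict.empty : PySem.Dict String Int).keys.contains y)) = u := by
    intro u
    refine List.filter_eq_self.mpr ?_
    intro a _
    simp [PySem.Dict.empty, PySem.Dict.keys]
  simp only [hfil]
  simp only [show (PySem.Dict.empty : PySem.Dict String Int).items = [] from rfl, List.nil_append]
  rw [← pv_numbering (PySem.Set.ofList lista) (PySem.Set.nodup_ofList lista) 1]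
  refine List.map_congr_left ?_
  intro v hv
  have hvl : v ∈ lista := (PySem.Set.mem_ofList lista v).mp hv
  rw [PySem.List.slice_to_natCast, pv_prefix lista v hvl]
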